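-- pv_equiv track=rewrite | github.com/matslindh/codingchallenges | knowit2019/08.py | pluss1tilpar
-- ===== SOURCE A (Python) =====
-- def pluss1tilpar(n):
--     ns = str(abs(n))
--     nn = ''
--
--     for i in range(len(ns)):
--         if int(ns[i]) % 2 == 0:
--             nn += str(int(ns[i]) + 1)
--         else:
--             nn += ns[i]
--
--     return int(nn) * (-1 if n < 0 else 1)
-- ===== SOURCE B (Python) =====
-- def pluss1tilpar(n):
--     # arithmetic digit loop: no string conversion at all
--     m = -n if n < 0 else n
--     if m == 0:
--         return 1
--     res = 0
--     place = 1
--     while m: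
--         d = m % 10
--         if d % 2 == 0:
--             d += 1
--         res += d * place
--         place *= 10
--         m //= 10
--     return -res if n < 0 else res
-- ===== Notes on version B (the rewrite author's own statement) =====
-- stated objective: alternative
-- what changed: Replaces the str(abs(n))/per-character int()/str() concatenation and final int() reparse by a pure arithmetic divmod loop that accumulates the bumped digits with a running place multiplier (0 special-cased to 1).
import Mathlib
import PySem

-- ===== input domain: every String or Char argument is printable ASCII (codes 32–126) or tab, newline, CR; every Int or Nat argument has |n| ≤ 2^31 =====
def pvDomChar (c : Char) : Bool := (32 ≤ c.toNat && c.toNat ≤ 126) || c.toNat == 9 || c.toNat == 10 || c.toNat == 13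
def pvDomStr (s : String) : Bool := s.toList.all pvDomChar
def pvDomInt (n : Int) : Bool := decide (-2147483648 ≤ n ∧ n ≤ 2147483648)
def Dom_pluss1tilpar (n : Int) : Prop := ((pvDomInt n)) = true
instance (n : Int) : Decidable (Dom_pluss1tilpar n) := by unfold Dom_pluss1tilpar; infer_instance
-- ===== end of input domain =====

-- B replaces A's string pipeline (str/abs, per-character int()/str() and a final int() reparse)
-- by a pure arithmetic least-significant-digit loop with a place multiplier.

-- ===== PORT A =====
-- literal transliteration of A: ns = str(abs(n)); build nn char by char; int(nn) * sign.
-- int(ns[i]) is ported as (ofChars? [c]).getD 0: on the digit characters produced by str(abs(n))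
-- the parse never fails, so the default is unreachable (same for the index lookup).
def pluss1tilpar (n : Int) : Int :=
  let ns : List Char := PySem.Int.toChars |n|
  let nn : List Char :=
    (PySem.List.pyRange 0 (PySem.Chars.len ns) 1).foldl
      (fun nn i =>
        match PySem.Chars.pyGet? ns i with
        | none => nn
        | some c =>
          let d : Int := (PySem.Int.ofChars? [c]).getD 0
          if PySem.Int.mod d 2 = 0 then nn ++ PySem.Int.toChars (d + 1) else nn ++ [c])
      []
  ((PySem.Int.ofChars? nn).getD 0) * (if n < 0 then -1 else 1)

-- ===== PORT B =====
-- B-side helper: the while-loop of Source B, state (m, res, place); m, res, place stay nonnegative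
-- in Source B, so the state is carried as ℕ (exact on those values).
def pvAltGo (m res place : Nat) : Nat :=
  if m = 0 then res
  else pvAltGo (m / 10) (res + (if m % 10 % 2 = 0 then m % 10 + 1 else m % 10) * place) (place * 10)
decreasing_by exact Nat.div_lt_self (Nat.pos_of_ne_zero (by assumption)) (by norm_num)

def pluss1tilpar_alt (n : Int) : Int :=
  let m : Nat := (if n < 0 then -n else n).toNat
  if m = 0 then 1
  else if n < 0 then -(pvAltGo m 0 1 : Int) else (pvAltGo m 0 1 : Int)

-- ===== PRECONDITION & SPEC =====
def Spec_pluss1tilpar (n : Int) (out : Int) : Prop := out = pluss1tilpar_alt n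
instance (n : Int) (out : Int) : Decidable (Spec_pluss1tilpar n out) := by unfold Spec_pluss1tilpar; infer_instance

-- ===== CLAIM (what is proved, stated in full; the proofs are below) =====
def Claim_equal_pluss1tilpar : Prop := ∀ (n : Int), Dom_pluss1tilpar n → Spec_pluss1tilpar n (pluss1tilpar n)

-- ===== LEMMAS AND PROOFS =====

-- the per-character action of A's loop, and the decimal-digit bump at the value level
def pvBumpC (c : Char) : List Char :=
  let d : Int := (PySem.Int.ofChars? [c]).getD 0
  if PySem.Int.mod d 2 = 0 then PySem.Int.toChars (d + 1) else [c]

def pvBumpD (r : Nat) : Nat := if r % 2 = 0 then r + 1 else r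

-- B's result, digit-recursively (most significant digit first)
def pvF (m : Nat) : Nat :=
  if m = 0 then 0 else pvF (m / 10) * 10 + pvBumpD (m % 10)
decreasing_by exact Nat.div_lt_self (Nat.pos_of_ne_zero (by assumption)) (by norm_num)

def pvStep (a : Nat) (c : Char) : Nat := a * 10 + (c.toNat - '0'.toNat)

-- ---- B side: the loop computes pvF ----
theorem pvAltGo_eq (m : Nat) : ∀ res place, pvAltGo m res place = res + pvF m * place := by
  induction m using Nat.strong_induction_on with
  | _ m ih =>
    intro res place
    rw [pvAltGo, pvF]
    by_cases h : m = 0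
    · simp [h]
    · simp only [h, if_false]
      rw [ih (m / 10) (Nat.div_lt_self (Nat.pos_of_ne_zero h) (by norm_num))]
      unfold pvBumpD
      split_ifs <;> ring

-- ---- A side: the index loop is a concatenation-map over the characters ----
theorem foldl_range_get (g : Char → List Char) (ns : List Char) : ∀ (acc : List Char),
    (PySem.List.pyRange 0 (PySem.Chars.len ns) 1).foldl
      (fun nn i =>
        match PySem.Chars.pyGet? ns i with
        | none => nn
        | some c => nn ++ g c) acc
      = acc ++ ns.flatMap g := by
  induction ns using List.reverseRecOn with
  | nil => intro acc; simp [PySem.Chars.len, PySem.List.pyRange]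
  | append_singleton xs x ih =>
    intro acc
    have hlen : PySem.Chars.len (xs ++ [x]) = (xs.length : Int) + 1 := by
      simp [PySem.Chars.len]
    rw [hlen, PySem.List.pyRange_one_succ_right (by positivity), List.foldl_append]
    have hcongr : ∀ (a : List Char), ∀ i ∈ PySem.List.pyRange 0 (xs.length : Int) 1,
        (fun nn i =>
          match PySem.Chars.pyGet? (xs ++ [x]) i with
          | none => nn
          | some c => nn ++ g c) a i
        = (fun nn i =>
          match PySem.Chars.pyGet? xs i with
          | none => nn
          | some c => nn ++ g c) a i := by
      intro a i hi
      obtain ⟨h0, h1⟩ := PySem.List.mem_pyRange_one.mp hi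
      have hi' : i.toNat < xs.length := by omega
      simp only [PySem.Chars.pyGet?, PySem.List.pyGet?_of_nonneg _ h0]
      rw [List.getElem?_append_left hi']
    rw [PySem.List.foldl_congr_mem _ _ _ acc hcongr]
    have hpre := ih acc
    have hchl : PySem.Chars.len xs = (xs.length : Int) := by
      simp [PySem.Chars.len]
    rw [hchl] at hpre
    rw [hpre]
    simp

-- ---- digit characters ----
theorem digit_not_space (c : Char) (h : c.isDigit = true) : PySem.Int.isIntSpace c = false := by
  simp only [Char.isDigit, decide_eq_true_eq, Bool.and_eq_true] at h
  simp only [PySem.Int.isIntSpace, Bool.or_eq_false_iff, decide_eq_false_iff_not, Char.ext_iff]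
  obtain ⟨h1, h2⟩ := h
  refine ⟨⟨⟨⟨⟨?_, ?_⟩, ?_⟩, ?_⟩, ?_⟩, ?_⟩ <;> intro hh <;> rw [hh] at h1 <;> simp at h1

theorem digit_char_cases (c : Char) (h : c.isDigit = true) :
    c ∈ ['0', '1', '2', '3', '4', '5', '6', '7', '8', '9'] := by
  simp only [Char.isDigit, decide_eq_true_eq, Bool.and_eq_true, ge_iff_le] at h
  obtain ⟨h1, h2⟩ := h
  rw [UInt32.le_iff_toNat_le] at h1 h2
  simp only [List.mem_cons, List.not_mem_nil, or_false, Char.ext_iff, UInt32.ext_iff,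
    show ('0'.val.toNat) = 48 from rfl, show ('1'.val.toNat) = 49 from rfl,
    show ('2'.val.toNat) = 50 from rfl, show ('3'.val.toNat) = 51 from rfl,
    show ('4'.val.toNat) = 52 from rfl, show ('5'.val.toNat) = 53 from rfl,
    show ('6'.val.toNat) = 54 from rfl, show ('7'.val.toNat) = 55 from rfl,
    show ('8'.val.toNat) = 56 from rfl, show ('9'.val.toNat) = 57 from rfl]
  rw [show ('0'.val.toNat) = 48 from rfl] at h1
  rw [show ('9'.val.toNat) = 57 from rfl] at h2
  omega

-- ---- the parse: int(s) on a nonempty string of digit characters ----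
theorem go_parse (g : List Char → Bool → Nat → Option Nat)
    (h0 : ∀ b acc, g [] b acc = if b = true then some acc else none)
    (hstep : ∀ c rest b acc, c.isDigit = true →
      g (c :: rest) b acc = g rest true (acc * 10 + (c.toNat - '0'.toNat)))
    : ∀ (ds : List Char) (acc : Nat), (∀ c ∈ ds, c.isDigit = true) →
      g ds true acc = some (ds.foldl pvStep acc) := by
  intro ds
  induction ds with
  | nil => intro acc _; simp [h0]
  | cons c rest ih =>
    intro acc h
    rw [hstep c rest true acc (h c (by simp))]
    simpa [pvStep] using ih (acc * 10 + (c.toNat - '0'.toNat)) (fun x hx => h x (by simp [hx]))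

theorem parse_core' (v : List Char → Option Nat) (g : List Char → Bool → Nat → Option Nat)
    (hv : ∀ c rest, v (c :: rest) = g (c :: rest) false 0)
    (h0 : ∀ b acc, g [] b acc = if b = true then some acc else none)
    (hstep : ∀ c rest b acc, c.isDigit = true →
      g (c :: rest) b acc = g rest true (acc * 10 + (c.toNat - '0'.toNat)))
    : ∀ c rest, c.isDigit = true → (∀ x ∈ rest, x.isDigit = true) →
      v (c :: rest) = some ((c :: rest).foldl pvStep 0) := by
  intro c rest hc hrest
  rw [hv, hstep c rest false 0 hc, List.foldl_cons]
  exact go_parse g h0 hstep rest _ hrest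

theorem parse_full (v : List Char → Option Nat) (g : List Char → Bool → Nat → Option Nat)
    (_hcap : ∀ rest, v ('0' :: rest) = g rest true (0 * 10 + ('0'.toNat - '0'.toNat)))
    (hv : ∀ c rest, v (c :: rest) = g (c :: rest) false 0)
    (h0 : ∀ b acc, g [] b acc = if b = true then some acc else none)
    (hstep : ∀ c rest b acc, c.isDigit = true →
      g (c :: rest) b acc = g rest true (acc * 10 + (c.toNat - '0'.toNat)))
    : ∀ c rest, c.isDigit = true → (∀ x ∈ rest, x.isDigit = true) →
      (Option.map (fun n : Int => n) (do let a ← v (c :: rest); pure ((a : Nat) : Int)))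
        = some (Int.ofNat ((c :: rest).foldl pvStep 0)) := by
  intro c rest hc hrest
  rw [parse_core' v g hv h0 hstep c rest hc hrest]
  rfl

theorem parse_digits (ds : List Char) (hne : ds ≠ [])
    (hd : ∀ c ∈ ds, c.isDigit = true) :
    PySem.Int.ofChars? ds = some (Int.ofNat (ds.foldl pvStep 0)) := by
  obtain ⟨c, rest, rfl⟩ : ∃ c rest, ds = c :: rest := by
    cases ds with | nil => simp at hne | cons a b => exact ⟨a, b, rfl⟩
  have hds : (c :: rest).dropWhile PySem.Int.isIntSpace = c :: rest := by
    rw [List.dropWhile_cons, digit_not_space c (hd c (by simp))]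
    simp
  have hds2 : ((c :: rest).reverse).dropWhile PySem.Int.isIntSpace = (c :: rest).reverse := by
    obtain ⟨c2, r2, heq⟩ : ∃ a b, (c :: rest).reverse = a :: b := by
      cases h' : (c :: rest).reverse with
      | nil => exact absurd h' (by simp)
      | cons a b => exact ⟨a, b, rfl⟩
    have hmem : c2 ∈ c :: rest := List.mem_reverse.mp (heq ▸ List.mem_cons_self)
    rw [heq, List.dropWhile_cons, digit_not_space c2 (hd c2 hmem)]
    simp
  have hc : c.isDigit = true := hd c (by simp)
  have hrest : ∀ x ∈ rest, x.isDigit = true := fun x hx => hd x (by simp [hx])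
  simp only [PySem.Int.ofChars?, hds, hds2, List.reverse_reverse]
  split
  · next ds heq => rw [List.cons.injEq] at heq; rw [heq.1] at hc; simp at hc
  · next ds heq => rw [List.cons.injEq] at heq; rw [heq.1] at hc; simp at hc
  · next ds h1 h2 =>
    refine parse_full _ _ (fun _ => rfl) (fun _ _ => rfl) ?h0 ?hstep c rest hc hrest
    case h0 => intro b acc; rfl
    case hstep =>
      intro c' r b acc h
      conv_lhs => whnf
      generalize hb : c'.isDigit = bv
      rw [hb] at h
      subst h
      rfl

-- ---- the bump at character vs value level ----
theorem bumpC_digitChar (r : Nat) (hr : r < 10) :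
    pvBumpC (Nat.digitChar r) = [Nat.digitChar (pvBumpD r)] := by
  interval_cases r <;> rfl

theorem step_bump (a : Nat) (r : Nat) (hr : r < 10) :
    pvStep a (Nat.digitChar (pvBumpD r)) = a * 10 + pvBumpD r := by
  interval_cases r <;> rfl

theorem bumpD_digit (r : Nat) (hr : r < 10) : (Nat.digitChar (pvBumpD r)).isDigit = true := by
  interval_cases r <;> rfl

-- ---- fold of the bumped digit string ----
theorem digit_is_digitChar (c : Char) (h : c.isDigit = true) :
    ∃ r, r < 10 ∧ c = Nat.digitChar r := by
  have h10 := digit_char_cases c h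
  fin_cases h10
  · exact ⟨0, by omega, rfl⟩
  · exact ⟨1, by omega, rfl⟩
  · exact ⟨2, by omega, rfl⟩
  · exact ⟨3, by omega, rfl⟩
  · exact ⟨4, by omega, rfl⟩
  · exact ⟨5, by omega, rfl⟩
  · exact ⟨6, by omega, rfl⟩
  · exact ⟨7, by omega, rfl⟩
  · exact ⟨8, by omega, rfl⟩
  · exact ⟨9, by omega, rfl⟩

theorem fold_toDigits (m : Nat) :
    ((Nat.toDigits 10 m).flatMap pvBumpC).foldl pvStep 0 = (if m = 0 then 1 else pvF m) := by
  induction m using Nat.strong_induction_on with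
  | _ m ih =>
    by_cases h0 : m = 0
    · subst h0; rfl
    · simp only [h0, if_false]
      by_cases hlt : m < 10
      · rw [Nat.toDigits_of_lt_base hlt]
        rw [show ([Nat.digitChar m]).flatMap pvBumpC = pvBumpC (Nat.digitChar m) ++ [] by simp,
          List.append_nil, bumpC_digitChar m hlt, List.foldl_cons, List.foldl_nil,
          step_bump 0 m hlt, pvF]
        rw [Nat.div_eq_of_lt hlt, Nat.mod_eq_of_lt hlt]
        simp only [h0, if_false]
        rw [show pvF 0 = 0 by rw [pvF]; rfl]
      · rw [Nat.toDigits_of_base_le (by norm_num) (by omega)]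
        rw [List.flatMap_append, List.foldl_append]
        rw [ih (m / 10) (Nat.div_lt_self (Nat.pos_of_ne_zero h0) (by norm_num))]
        have h10 : m / 10 ≠ 0 := by omega
        simp only [h10, if_false]
        have hmod : m % 10 < 10 := Nat.mod_lt _ (by norm_num)
        rw [show ([Nat.digitChar (m % 10)]).flatMap pvBumpC
            = pvBumpC (Nat.digitChar (m % 10)) ++ [] by simp,
          List.append_nil, bumpC_digitChar _ hmod, List.foldl_cons, List.foldl_nil,
          step_bump _ _ hmod]
        conv_rhs => rw [pvF]
        simp only [h0, if_false]

theorem toDigits_bumped_digits (m : Nat) :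
    ∀ c ∈ (Nat.toDigits 10 m).flatMap pvBumpC, c.isDigit = true := by
  intro c hc
  rw [List.mem_flatMap] at hc
  obtain ⟨c0, hc0, hcin⟩ := hc
  have hd0 := Nat.isDigit_of_mem_toDigits (by norm_num) (by norm_num) hc0
  obtain ⟨r, hr, rfl⟩ := digit_is_digitChar c0 hd0
  rw [bumpC_digitChar r hr, List.mem_singleton] at hcin
  subst hcin
  exact bumpD_digit r hr

theorem toDigits_bumped_ne_nil (m : Nat) :
    (Nat.toDigits 10 m).flatMap pvBumpC ≠ [] := by
  obtain ⟨c0, tl, heq⟩ : ∃ a b, Nat.toDigits 10 m = a :: b := by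
    cases h' : Nat.toDigits 10 m with
    | nil => have := @Nat.length_toDigits_pos 10 m; rw [h'] at this; simp at this
    | cons a b => exact ⟨a, b, rfl⟩
  have hd0 : c0.isDigit = true :=
    Nat.isDigit_of_mem_toDigits (by norm_num) (by norm_num) (heq ▸ List.mem_cons_self)
  obtain ⟨r, hr, rfl⟩ := digit_is_digitChar c0 hd0
  rw [heq, List.flatMap_cons, bumpC_digitChar r hr]
  simp

-- ---- assembling both sides ----
theorem A_eq (n : Int) :
    pluss1tilpar n
      = (if n.natAbs = 0 then 1 else Int.ofNat (pvF n.natAbs)) * (if n < 0 then -1 else 1) := by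
  unfold pluss1tilpar
  have habs : PySem.Int.toChars |n| = Nat.toDigits 10 n.natAbs := by
    rw [PySem.Int.toChars, if_neg (by simp [abs_nonneg])]
    congr 1
    rcases le_or_gt 0 n with h | h
    · rw [abs_of_nonneg h]; omega
    · rw [abs_of_neg h]; omega
  have hbody : (fun (nn : List Char) (i : Int) =>
      match PySem.Chars.pyGet? (Nat.toDigits 10 n.natAbs) i with
      | none => nn
      | some c =>
        let d : Int := (PySem.Int.ofChars? [c]).getD 0
        if PySem.Int.mod d 2 = 0 then nn ++ PySem.Int.toChars (d + 1) else nn ++ [c])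
      = (fun nn i =>
      match PySem.Chars.pyGet? (Nat.toDigits 10 n.natAbs) i with
      | none => nn
      | some c => nn ++ pvBumpC c) := by
    funext nn i
    cases hg : PySem.Chars.pyGet? (Nat.toDigits 10 n.natAbs) i with
    | none => rfl
    | some c =>
      simp only [pvBumpC]
      split_ifs <;> rfl
  simp only [habs, hbody, foldl_range_get pvBumpC (Nat.toDigits 10 n.natAbs) [],
    List.nil_append]
  rw [parse_digits _ (toDigits_bumped_ne_nil n.natAbs) (toDigits_bumped_digits n.natAbs),
    fold_toDigits]
  simp only [Option.getD_some]
  split_ifs with h1 h2 h3 <;> simp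

theorem B_eq (n : Int) :
    pluss1tilpar_alt n
      = if n.natAbs = 0 then 1 else (if n < 0 then -(pvF n.natAbs : Int) else (pvF n.natAbs : Int)) := by
  have hm : (if n < 0 then -n else n).toNat = n.natAbs := by split_ifs <;> omega
  unfold pluss1tilpar_alt
  simp only [hm, pvAltGo_eq]
  norm_num

-- ===== VERDICT (by name: the statement is the Claim_ definition above) =====
theorem pluss1tilpar_spec : Claim_equal_pluss1tilpar := by
  intro n _
  unfold Spec_pluss1tilpar
  rw [A_eq, B_eq]
  by_cases h0 : n.natAbs = 0
  · have : n = 0 := by omega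
    subst this
    norm_num
  · simp only [h0, if_false]
    by_cases hneg : n < 0 <;> simp [hneg]
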